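-- pv_equiv track=rewrite | github.com/foliant-docs/foliantcontrib.meta | foliant/meta_commands/generate/generate.py | convert_to_id
-- ===== SOURCE A (Python) =====
-- def convert_to_id(title: str, existing_ids: list) -> str:
--     '''
--     (based on convert_to_anchor function from apilinks preprocessor)
--     Convert heading into id. Guaranteed to be unique among `existing_ids`.
--
--     >>> convert_to_id('GET /endpoint/method{id}')
--     'get-endpoint-method-id'
--     '''
--
--     id_ = ''
--     accum = False
--     for char in title:
--         if char == '_' or char.isalpha():
--             if accum:
--                 accum = False
--                 id_ += f'-{char.lower()}'
--             else:
--                 id_ += char.lower()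
--         else:
--             accum = True
--     id_ = id_.strip(' -')
--
--     counter = 1
--     result = id_
--     while result in existing_ids:
--         counter += 1
--         result = '-'.join([id_, str(counter)])
--     existing_ids.append(result)
--     return result
-- ===== SOURCE B (Python) =====
-- def convert_to_id(title: str, existing_ids: list) -> str:
--     '''
--     Convert heading into id. Guaranteed to be unique among `existing_ids`.
--     Token-scan rewrite: slice out maximal runs of kept characters and join
--     them with dashes, instead of A's per-character accumulator state machine.
--     '''
--     def keep(char):
--         return char == '_' or char.isalpha()
--
--     tokens = []
--     i, n = 0, len(title)
--     while i < n:
--         if keep(title[i]):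
--             j = i + 1
--             while j < n and keep(title[j]):
--                 j += 1
--             tokens.append(title[i:j].lower())
--             i = j
--         else:
--             i += 1
--     id_ = '-'.join(tokens)
--
--     if id_ in existing_ids:
--         k = 2
--         while f'{id_}-{k}' in existing_ids:
--             k += 1
--         result = f'{id_}-{k}'
--     else:
--         result = id_
--     existing_ids.append(result)
--     return result
-- ===== Notes on version B (the rewrite author's own statement) =====
-- stated objective: alternative
-- what changed: The per-character accumulator state machine plus trailing strip(' -') is replaced by a token scan that slices out maximal runs of kept characters, lowercases and joins them with '-', and the while-mutate collision loop is replaced by an explicit search for the first free numbered candidate.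
import Mathlib
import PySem

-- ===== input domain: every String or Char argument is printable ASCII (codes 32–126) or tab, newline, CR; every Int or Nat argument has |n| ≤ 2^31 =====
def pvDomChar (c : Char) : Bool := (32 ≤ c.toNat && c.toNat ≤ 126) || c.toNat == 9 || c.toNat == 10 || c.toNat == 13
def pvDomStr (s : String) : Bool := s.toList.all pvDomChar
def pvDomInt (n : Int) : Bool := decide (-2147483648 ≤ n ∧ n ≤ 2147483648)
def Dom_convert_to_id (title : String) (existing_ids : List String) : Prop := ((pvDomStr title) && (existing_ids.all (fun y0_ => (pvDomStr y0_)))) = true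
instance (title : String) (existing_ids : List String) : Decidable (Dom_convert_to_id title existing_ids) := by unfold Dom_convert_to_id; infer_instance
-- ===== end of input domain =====

-- B replaces A's per-char accumulator state machine + strip(' -') by a token scan
-- (maximal kept runs, lowercased, joined with '-') and searches for the first free
-- numbered candidate; return-value equivalence only (both Pythons append to existing_ids).


-- ===== PORT A =====
-- Python's `char == '_' or char.isalpha()` (shared by both ports)
def pvKeep (c : Char) : Bool := c == '_' || PySem.Chars.isalpha c

-- one step of A's `for char in title` loop, state = (id_, accum)
def pvSlugStep (st : List Char × Bool) (c : Char) : List Char × Bool :=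
  if pvKeep c then
    if st.2 then (st.1 ++ ['-', PySem.Chars.lowerChar c], false)
    else (st.1 ++ [PySem.Chars.lowerChar c], false)
  else (st.1, true)

-- A's `while result in existing_ids` loop; the fuel argument only makes the
-- recursion total — the loop always finds a free id within existing.length + 1 tries
def pvWhile (id_ : List Char) (existing : List String) : Nat → Int → List Char → String
  | 0, _, result => String.ofList result
  | fuel+1, counter, result =>
    if String.ofList result ∈ existing then
      pvWhile id_ existing fuel (counter + 1)
        (PySem.Chars.join ['-'] [id_, PySem.Int.toChars (counter + 1)])
    else String.ofList result

def convert_to_id (title : String) (existing_ids : List String) : String :=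
  let raw := (title.toList.foldl pvSlugStep ([], false)).1
  let id_ := PySem.Chars.stripChars raw [' ', '-']
  pvWhile id_ existing_ids (existing_ids.length + 2) 1 id_

-- ===== PORT B =====
-- B's outer while: maximal runs of kept chars (title[i:j]), lowercased
def pvTokens : List Char → List (List Char)
  | [] => []
  | c :: cs =>
    if pvKeep c then
      ((c :: cs.takeWhile pvKeep).map PySem.Chars.lowerChar) :: pvTokens (cs.dropWhile pvKeep)
    else pvTokens cs
termination_by l => l.length
decreasing_by
  · have := List.length_dropWhile_le pvKeep cs; simp; omega
  · simp

-- B's `while f'{id_}-{k}' in existing_ids: k += 1`; fuel only makes it total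
def pvFind (id_ : List Char) (existing : List String) : Nat → Int → String
  | 0, k => String.ofList (PySem.Chars.join ['-'] [id_, PySem.Int.toChars k])
  | fuel+1, k =>
    if String.ofList (PySem.Chars.join ['-'] [id_, PySem.Int.toChars k]) ∈ existing then
      pvFind id_ existing fuel (k + 1)
    else String.ofList (PySem.Chars.join ['-'] [id_, PySem.Int.toChars k])

def convert_to_id_alt (title : String) (existing_ids : List String) : String :=
  let id_ := PySem.Chars.join ['-'] (pvTokens title.toList)
  if String.ofList id_ ∈ existing_ids then pvFind id_ existing_ids (existing_ids.length + 1) 2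
  else String.ofList id_

-- ===== PRECONDITION & SPEC =====
def Spec_convert_to_id (title : String) (existing_ids : List String) (out : String) : Prop := out = convert_to_id_alt title existing_ids
instance (title : String) (existing_ids : List String) (out : String) : Decidable (Spec_convert_to_id title existing_ids out) := by unfold Spec_convert_to_id; infer_instance

-- ===== CLAIM (what is proved, stated in full; the proofs are below) =====
def Claim_equal_convert_to_id : Prop := ∀ (title : String) (existing_ids : List String), Dom_convert_to_id title existing_ids → Spec_convert_to_id title existing_ids (convert_to_id title existing_ids)

-- ===== LEMMAS AND PROOFS =====

-- what A's fold appends after the initial accumulator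
def pvRest : List Char → Bool → List Char
  | [], _ => []
  | c :: cs, a =>
    if pvKeep c then
      (if a then '-' :: PySem.Chars.lowerChar c :: pvRest cs false
       else PySem.Chars.lowerChar c :: pvRest cs false)
    else pvRest cs true

lemma pvFoldl_eq (cs : List Char) : ∀ (acc : List Char) (a : Bool),
    (cs.foldl pvSlugStep (acc, a)).1 = acc ++ pvRest cs a := by
  induction cs with
  | nil => intro acc a; simp [pvRest]
  | cons c cs ih =>
    intro acc a
    by_cases h : pvKeep c = true
    · cases a <;> simp [pvSlugStep, pvRest, h, ih]
    · simp [pvSlugStep, pvRest, h, ih]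

-- the joined tokens, with a leading '-' when there is at least one token
def pvDashed (ts : List (List Char)) : List Char :=
  if ts = [] then [] else '-' :: PySem.Chars.join ['-'] ts

lemma pvJoin_cons (t : List Char) (ts : List (List Char)) :
    PySem.Chars.join ['-'] (t :: ts) = t ++ pvDashed ts := by
  cases ts with
  | nil => simp [PySem.Chars.join, pvDashed, List.intercalate]
  | cons t' ts => simp [PySem.Chars.join, pvDashed, List.intercalate]

lemma pvRest_tokens (cs : List Char) :
    pvRest cs true = pvDashed (pvTokens cs) ∧
    pvRest cs false = (cs.takeWhile pvKeep).map PySem.Chars.lowerChar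
      ++ pvDashed (pvTokens (cs.dropWhile pvKeep)) := by
  induction cs with
  | nil => simp [pvRest, pvTokens, pvDashed]
  | cons c cs ih =>
    by_cases h : pvKeep c = true
    · constructor
      · rw [show pvRest (c :: cs) true
              = '-' :: PySem.Chars.lowerChar c :: pvRest cs false by simp [pvRest, h]]
        rw [ih.2, show pvTokens (c :: cs)
              = ((c :: cs.takeWhile pvKeep).map PySem.Chars.lowerChar)
                :: pvTokens (cs.dropWhile pvKeep) by rw [pvTokens]; simp [h]]
        simp [pvDashed, pvJoin_cons]
      · rw [show pvRest (c :: cs) false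
              = PySem.Chars.lowerChar c :: pvRest cs false by simp [pvRest, h]]
        rw [ih.2]
        simp [h]
    · constructor
      · rw [show pvRest (c :: cs) true = pvRest cs true by simp [pvRest, h]]
        rw [ih.1, show pvTokens (c :: cs) = pvTokens cs by rw [pvTokens]; simp [h]]
      · rw [show pvRest (c :: cs) false = pvRest cs true by simp [pvRest, h]]
        rw [ih.1]
        simp [h]
        rw [show pvTokens (c :: cs) = pvTokens cs by rw [pvTokens]; simp [h]]

lemma pvGood_lowerChar (c : Char) (h : pvKeep c = true) :
    ([' ', '-'] : List Char).contains (PySem.Chars.lowerChar c) = false := by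
  have hrange : c = '_' ∨ (65 ≤ c.toNat ∧ c.toNat ≤ 90) ∨ (97 ≤ c.toNat ∧ c.toNat ≤ 122) := by
    simp only [pvKeep, Bool.or_eq_true, beq_iff_eq, PySem.Chars.isalpha,
      PySem.Chars.isupper, PySem.Chars.islower, Bool.and_eq_true, decide_eq_true_eq,
      Char.le_def] at h
    rcases h with h | ⟨h1, h2⟩ | ⟨h1, h2⟩
    · exact Or.inl h
    · exact Or.inr (Or.inl ⟨h1, h2⟩)
    · exact Or.inr (Or.inr ⟨h1, h2⟩)
  have key : (PySem.Chars.lowerChar c).toNat ≠ 32 ∧ (PySem.Chars.lowerChar c).toNat ≠ 45 := by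
    unfold PySem.Chars.lowerChar
    rcases hrange with rfl | ⟨h1, h2⟩ | ⟨h1, h2⟩
    · decide
    · have hup : PySem.Chars.isupper c = true := by
        unfold PySem.Chars.isupper
        rw [Bool.and_eq_true, decide_eq_true_eq, decide_eq_true_eq, Char.le_def, Char.le_def]
        exact ⟨h1, h2⟩
      rw [if_pos hup]
      have hvalid : (c.toNat + 32).isValidChar := Or.inl (by omega)
      have hval : (Char.ofNat (c.toNat + 32)).toNat = c.toNat + 32 := by
        rw [Char.ofNat, dif_pos hvalid]
        unfold Char.ofNatAux Char.toNat
        cases hvalid with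
        | inl h' => simp [UInt32.toNat_ofNatLT]; omega
        | inr h' => simp [UInt32.toNat_ofNatLT]; omega
      omega
    · have hup : PySem.Chars.isupper c = false := by
        rw [Bool.eq_false_iff]
        intro hup
        unfold PySem.Chars.isupper at hup
        rw [Bool.and_eq_true, decide_eq_true_eq, decide_eq_true_eq,
          Char.le_def, Char.le_def] at hup
        have h90 : c.toNat ≤ 90 := hup.2
        omega
      rw [if_neg (by rw [hup]; exact Bool.false_ne_true)]
      omega
  simp only [List.contains_cons, List.contains_nil, Bool.or_false, Bool.or_eq_false_iff,
    beq_eq_false_iff_ne, ne_eq]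
  constructor
  · intro he; exact key.1 (by rw [he]; rfl)
  · intro he; exact key.2 (by rw [he]; rfl)

lemma pvTokens_good (cs : List Char) : ∀ t ∈ pvTokens cs,
    t ≠ [] ∧ ∀ x ∈ t, ([' ', '-'] : List Char).contains x = false := by
  induction cs using pvTokens.induct with
  | case1 => simp [pvTokens]
  | case2 c cs h ih =>
    intro t ht
    rw [pvTokens, if_pos h] at ht
    rcases List.mem_cons.mp ht with rfl | ht
    · refine ⟨by simp, ?_⟩
      intro x hx
      simp only [List.mem_map] at hx
      obtain ⟨y, hy, rfl⟩ := hx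
      rcases List.mem_cons.mp hy with rfl | hy
      · exact pvGood_lowerChar _ h
      · exact pvGood_lowerChar _ (List.mem_takeWhile_imp hy)
    · exact ih t ht
  | case3 c cs h ih =>
    intro t ht
    rw [pvTokens, if_neg h] at ht
    exact ih t ht

lemma pvStripChars_eq (s chars : List Char) :
    PySem.Chars.stripChars s chars
      = ((s.dropWhile (fun c => chars.contains c)).reverse.dropWhile
          (fun c => chars.contains c)).reverse := rfl

lemma pvDropId (chars : List Char) (l : List Char)
    (h1 : ∀ c, l.head? = some c → chars.contains c = false) :
    l.dropWhile (fun c => chars.contains c) = l := by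
  cases l with
  | nil => simp
  | cons a as => exact List.dropWhile_cons_of_neg (by simpa using h1 a rfl)

lemma pvRStripId (chars : List Char) (l : List Char)
    (h2 : ∀ c, l.getLast? = some c → chars.contains c = false) :
    (l.reverse.dropWhile (fun c => chars.contains c)).reverse = l := by
  rw [pvDropId chars l.reverse (by intro c hc; rw [List.head?_reverse] at hc; exact h2 c hc)]
  exact List.reverse_reverse l

lemma pvJoin_ne_nil (t : List Char) (ts : List (List Char)) (ht : t ≠ []) :
    PySem.Chars.join ['-'] (t :: ts) ≠ [] := by
  rw [pvJoin_cons]; simp [ht]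

lemma pvJoin_head_good (t : List Char) (ts : List (List Char))
    (hg : ∀ u ∈ t :: ts, u ≠ [] ∧ ∀ x ∈ u, ([' ', '-'] : List Char).contains x = false) :
    ∀ c, (PySem.Chars.join ['-'] (t :: ts)).head? = some c
      → ([' ', '-'] : List Char).contains c = false := by
  intro c hc
  rw [pvJoin_cons, List.head?_append] at hc
  have htne := (hg t (by simp)).1
  cases t with
  | nil => exact absurd rfl htne
  | cons a as =>
    simp only [List.head?_cons, Option.some_or, Option.some.injEq] at hc
    subst hc
    exact (hg (a :: as) (by simp)).2 a (by simp)

lemma pvJoin_getLast (ts : List (List Char)) (hne : ∀ t ∈ ts, t ≠ []) :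
    ∀ c, (PySem.Chars.join ['-'] ts).getLast? = some c → ∃ t ∈ ts, c ∈ t := by
  induction ts with
  | nil =>
    intro c hc
    simp [PySem.Chars.join, List.intercalate] at hc
  | cons t ts ih =>
    intro c hc
    cases ts with
    | nil =>
      rw [pvJoin_cons] at hc
      simp [pvDashed] at hc
      exact ⟨t, by simp, List.mem_of_getLast? hc⟩
    | cons t' ts' =>
      rw [pvJoin_cons, pvDashed, if_neg (List.cons_ne_nil _ _)] at hc
      rw [List.getLast?_append, List.getLast?_cons] at hc
      have hJ : PySem.Chars.join ['-'] (t' :: ts') ≠ [] :=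
        pvJoin_ne_nil t' ts' (hne t' (by simp))
      cases hg2 : (PySem.Chars.join ['-'] (t' :: ts')).getLast? with
      | none => exact absurd (List.getLast?_eq_none_iff.mp hg2) hJ
      | some d =>
        rw [hg2] at hc
        simp only [Option.getD_some, Option.some_or, Option.some.injEq] at hc
        subst hc
        obtain ⟨u, hu, hd⟩ := ih (fun x hx => hne x (List.mem_cons_of_mem _ hx)) d hg2
        exact ⟨u, List.mem_cons_of_mem _ hu, hd⟩

lemma pvGoodJoin_strip (ts : List (List Char))
    (hg : ∀ t ∈ ts, t ≠ [] ∧ ∀ x ∈ t, ([' ', '-'] : List Char).contains x = false) :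
    PySem.Chars.stripChars (PySem.Chars.join ['-'] ts) [' ', '-']
      = PySem.Chars.join ['-'] ts := by
  cases ts with
  | nil => simp [PySem.Chars.join, List.intercalate, PySem.Chars.stripChars]
  | cons t ts =>
    rw [pvStripChars_eq]
    rw [pvDropId [' ', '-'] _ (pvJoin_head_good t ts hg)]
    refine pvRStripId [' ', '-'] _ ?_
    intro c hc
    obtain ⟨u, hu, hcu⟩ := pvJoin_getLast (t :: ts) (fun x hx => (hg x hx).1) c hc
    exact (hg u hu).2 c hcu

lemma pvDashed_strip (ts : List (List Char))
    (hg : ∀ t ∈ ts, t ≠ [] ∧ ∀ x ∈ t, ([' ', '-'] : List Char).contains x = false) :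
    PySem.Chars.stripChars (pvDashed ts) [' ', '-'] = PySem.Chars.join ['-'] ts := by
  cases ts with
  | nil => simp [pvDashed, PySem.Chars.join, List.intercalate, PySem.Chars.stripChars]
  | cons t ts =>
    rw [pvDashed, if_neg (List.cons_ne_nil _ _)]
    rw [pvStripChars_eq]
    rw [List.dropWhile_cons_of_pos (by decide)]
    rw [pvDropId [' ', '-'] _ (pvJoin_head_good t ts hg)]
    refine pvRStripId [' ', '-'] _ ?_
    intro c hc
    obtain ⟨u, hu, hcu⟩ := pvJoin_getLast (t :: ts) (fun x hx => (hg x hx).1) c hc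
    exact (hg u hu).2 c hcu

lemma pvSlug_eq (title : List Char) :
    PySem.Chars.stripChars ((title.foldl pvSlugStep ([], false)).1) [' ', '-']
      = PySem.Chars.join ['-'] (pvTokens title) := by
  rw [pvFoldl_eq]
  simp only [List.nil_append]
  cases title with
  | nil => simp [pvRest, pvTokens, PySem.Chars.join, List.intercalate, PySem.Chars.stripChars]
  | cons c cs =>
    by_cases h : pvKeep c = true
    · have hrw : pvRest (c :: cs) false = PySem.Chars.join ['-'] (pvTokens (c :: cs)) := by
        rw [show pvRest (c :: cs) false
              = PySem.Chars.lowerChar c :: pvRest cs false by simp [pvRest, h]]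
        rw [(pvRest_tokens cs).2]
        rw [show pvTokens (c :: cs)
              = ((c :: cs.takeWhile pvKeep).map PySem.Chars.lowerChar)
                :: pvTokens (cs.dropWhile pvKeep) by rw [pvTokens]; simp [h]]
        rw [pvJoin_cons]
        simp
      rw [hrw]
      exact pvGoodJoin_strip _ (pvTokens_good _)
    · have hrw : pvRest (c :: cs) false = pvDashed (pvTokens (c :: cs)) := by
        rw [show pvRest (c :: cs) false = pvRest cs true by simp [pvRest, h]]
        rw [(pvRest_tokens cs).1]
        rw [show pvTokens (c :: cs) = pvTokens cs by rw [pvTokens]; simp [h]]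
      rw [hrw]
      exact pvDashed_strip _ (pvTokens_good _)

lemma pvLoop_eq (id_ : List Char) (ex : List String) :
    ∀ (f : Nat) (k : Int),
      pvWhile id_ ex f k (PySem.Chars.join ['-'] [id_, PySem.Int.toChars k])
        = pvFind id_ ex f k := by
  intro f
  induction f with
  | zero => intro k; rfl
  | succ f ih =>
    intro k
    rw [pvWhile, pvFind]
    split
    · exact ih (k + 1)
    · rfl

-- ===== VERDICT (by name: the statement is the Claim_ definition above) =====
theorem convert_to_id_spec : Claim_equal_convert_to_id := by
  unfold Claim_equal_convert_to_id
  intro title ex _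
  unfold Spec_convert_to_id convert_to_id convert_to_id_alt
  simp only []
  rw [pvSlug_eq]
  rw [show ex.length + 2 = (ex.length + 1) + 1 from rfl, pvWhile]
  split
  · rw [show (1 : Int) + 1 = 2 from rfl]
    exact pvLoop_eq _ ex (ex.length + 1) 2
  · rfl
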